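-- pv_equiv track=rewrite | github.com/leeejeonghwa/Daywon | app/core/prompt_image/createPrompt.py | split_text_two
-- ===== SOURCE A (Python) =====
-- def split_text_two(text):
--     # 문장을 온점(.) 기준으로 나누기
--     sentences = text.split('.')
--
--     # 결과가 빈 문자 열이 아닌 경우 에만 리스트에 추가
--     sentences = [sentence.strip() + '.' for sentence in sentences if sentence.strip()]
--     sentence_pairs = []
--
--     for i in range(0, len(sentences), 2):
--         if i + 1 < len(sentences):
--             sentence_pairs.append(sentences[i] + " " + sentences[i + 1])
--         else:
--             sentence_pairs.append(sentences[i])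
--     return sentence_pairs
-- ===== SOURCE B (Python) =====
-- def split_text_two(text):
--     # Single pass over the raw '.'-split pieces: normalise and pair in one loop
--     # carrying at most one unpaired sentence, instead of building a sentence list first
--     # and then pairing it by index in a second loop.
--     pairs = []
--     pending = None
--     for piece in text.split('.'):
--         s = piece.strip()
--         if not s:
--             continue
--         s += '.'
--         if pending is None:
--             pending = s
--         else:
--             pairs.append(pending + " " + s)
--             pending = None
--     if pending is not None:
--         pairs.append(pending)
--     return pairs
-- ===== Notes on version B (the rewrite author's own statement) =====
-- stated objective: alternative
-- what changed: Replaced A's two staged passes (build a normalised sentence list, then a second index-stepped loop pairing sentences[i] with sentences[i+1]) by one single streaming pass over the raw split pieces carrying at most one unpaired sentence in an accumulator; no intermediate sentence list and no index arithmetic exist in B.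
import Mathlib
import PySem

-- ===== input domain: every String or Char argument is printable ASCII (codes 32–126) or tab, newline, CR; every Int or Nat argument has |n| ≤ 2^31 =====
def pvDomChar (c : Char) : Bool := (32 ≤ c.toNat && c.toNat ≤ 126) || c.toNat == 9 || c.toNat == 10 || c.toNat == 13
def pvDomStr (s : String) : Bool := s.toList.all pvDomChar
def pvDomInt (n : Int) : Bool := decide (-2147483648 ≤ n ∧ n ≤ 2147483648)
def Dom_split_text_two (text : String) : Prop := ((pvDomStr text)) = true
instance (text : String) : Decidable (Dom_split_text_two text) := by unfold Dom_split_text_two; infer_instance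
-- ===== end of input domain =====

-- B fuses A's two passes (normalised sentence list, then index-stepped pairing loop) into one
-- streaming pass over the raw split pieces carrying at most one unpaired sentence (objective: alternative).

-- ===== PORT A =====
def split_text_two (text : String) : List String :=
  let sentences := (((PySem.Str.split? text ".").getD []).filter
      (fun sentence => PySem.Str.strip sentence ≠ "")).map
      (fun sentence => PySem.Str.strip sentence ++ ".")
  (PySem.List.pyRange 0 (PySem.List.len sentences) 2).foldl
    (fun sentence_pairs i =>
      if i + 1 < PySem.List.len sentences then
        sentence_pairs ++ [PySem.List.pyGetD sentences i "" ++ " " ++ PySem.List.pyGetD sentences (i + 1) ""]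
      else
        sentence_pairs ++ [PySem.List.pyGetD sentences i ""]) []

-- ===== PORT B =====
-- one loop body of Source B: skip blank pieces; stash a lone sentence, emit a pair otherwise
def bStep (st : List String × Option String) (piece : String) : List String × Option String :=
  let s := PySem.Str.strip piece
  if s = "" then st
  else
    let s := s ++ "."
    match st.2 with
    | none => (st.1, some s)
    | some p => (st.1 ++ [p ++ " " ++ s], none)

def split_text_two_alt (text : String) : List String :=
  let st := ((PySem.Str.split? text ".").getD []).foldl bStep ([], none)
  match st.2 with
  | none => st.1
  | some p => st.1 ++ [p]

-- ===== PRECONDITION & SPEC =====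
def Spec_split_text_two (text : String) (out : List String) : Prop := out = split_text_two_alt text
instance (text : String) (out : List String) : Decidable (Spec_split_text_two text out) := by unfold Spec_split_text_two; infer_instance

-- ===== CLAIM (what is proved, stated in full; the proofs are below) =====
def Claim_equal_split_text_two : Prop := ∀ (text : String), Dom_split_text_two text → Spec_split_text_two text (split_text_two text)

-- ===== LEMMAS AND PROOFS =====

-- common reference form: pair up a list two at a time
def pairUp : List String → List String
  | [] => []
  | [first] => [first]
  | first :: second :: rest => (first ++ " " ++ second) :: pairUp rest

-- a step-2 cons/nil pair of induction forms for pyRange (PySem only ships them for step ±1)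
theorem pyRange_two_cons (a b : Int) (h : a < b) :
    PySem.List.pyRange a b 2 = a :: PySem.List.pyRange (a + 2) b 2 := by
  rw [PySem.List.pyRange_of_pos _ _ (by norm_num),
    PySem.List.pyRange_of_pos _ _ (by norm_num : (0:Int) < 2)]
  simp only [if_pos h]
  by_cases h2 : a + 2 < b
  · rw [if_pos h2]
    have : ((b - a + 2 - 1) / 2).toNat = ((b - (a + 2) + 2 - 1) / 2).toNat + 1 := by omega
    rw [this, List.range_succ_eq_map]
    simp [List.map_map, Function.comp]
    intro k _; ring
  · rw [if_neg h2]
    have : ((b - a + 2 - 1) / 2).toNat = 1 := by omega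
    simp [this, List.range_succ]

theorem pyRange_two_nil (a b : Int) (h : b ≤ a) : PySem.List.pyRange a b 2 = [] := by
  rw [PySem.List.pyRange_of_pos _ _ (by norm_num : (0:Int) < 2)]
  rw [if_neg (by omega)]
  simp

-- A's index loop over full, started at index a, equals pairUp of full.drop a
theorem loop_eq_pairUp (full : List String) : ∀ (n a : Nat) (acc : List String),
    full.length - a ≤ n →
    (PySem.List.pyRange (a : Int) (PySem.List.len full) 2).foldl
      (fun sentence_pairs i =>
        if i + 1 < PySem.List.len full then
          sentence_pairs ++ [PySem.List.pyGetD full i "" ++ " " ++ PySem.List.pyGetD full (i + 1) ""]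
        else
          sentence_pairs ++ [PySem.List.pyGetD full i ""]) acc
    = acc ++ pairUp (full.drop a) := by
  intro n
  induction n with
  | zero =>
    intro a acc h
    rw [pyRange_two_nil _ _ (by simp [PySem.List.len_eq]; omega)]
    rw [List.drop_eq_nil_of_le (by omega)]
    simp [pairUp]
  | succ m ih =>
    intro a acc h
    by_cases ha : a < full.length
    · rw [pyRange_two_cons _ _ (by simp [PySem.List.len_eq]; exact_mod_cast ha)]
      rw [List.foldl_cons]
      have hcast : (a : Int) + 2 = ((a + 2 : Nat) : Int) := by push_cast; ring
      rw [hcast, ih (a + 2) _ (by omega)]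
      have hdrop : full.drop a = full[a] :: full.drop (a + 1) :=
        List.drop_eq_getElem_cons ha
      by_cases hb : a + 1 < full.length
      · have hcond : ((a : Int) + 1 < PySem.List.len full) := by
          simp [PySem.List.len_eq]; exact_mod_cast hb
        rw [if_pos hcond]
        have hdrop2 : full.drop (a + 1) = full[a + 1] :: full.drop (a + 2) :=
          List.drop_eq_getElem_cons hb
        have hg1 : PySem.List.pyGetD full (a : Int) "" = full[a] := by
          rw [PySem.List.pyGetD_natCast]; exact List.getD_eq_getElem full "" ha
        have hg2 : PySem.List.pyGetD full ((a : Int) + 1) "" = full[a + 1] := by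
          have hc : (a : Int) + 1 = ((a + 1 : Nat) : Int) := by push_cast; ring
          rw [hc, PySem.List.pyGetD_natCast]; exact List.getD_eq_getElem full "" hb
        rw [hg1, hg2, hdrop, hdrop2]
        simp [pairUp]
      · have hcond : ¬ ((a : Int) + 1 < PySem.List.len full) := by
          simp [PySem.List.len_eq]; omega
        rw [if_neg hcond]
        have hg1 : PySem.List.pyGetD full (a : Int) "" = full[a] := by
          rw [PySem.List.pyGetD_natCast]; exact List.getD_eq_getElem full "" ha
        have hdrop1 : full.drop (a + 1) = [] := List.drop_eq_nil_of_le (by omega)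
        have hdrop2 : full.drop (a + 2) = [] := List.drop_eq_nil_of_le (by omega)
        rw [hg1, hdrop, hdrop1, hdrop2]
        simp [pairUp]
    · rw [pyRange_two_nil _ _ (by simp [PySem.List.len_eq]; omega)]
      rw [List.drop_eq_nil_of_le (by omega)]
      simp [pairUp]

-- B's single fold over the raw pieces, finalised, equals pairUp of the normalised sentences
-- (pending prefixed in front)
theorem bfold_eq_pairUp (raw : List String) : ∀ (acc : List String) (pend : Option String),
    (match (raw.foldl bStep (acc, pend)).2 with
     | none => (raw.foldl bStep (acc, pend)).1
     | some p => (raw.foldl bStep (acc, pend)).1 ++ [p])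
    = acc ++ pairUp (pend.toList ++
        (raw.filter (fun x => PySem.Str.strip x ≠ "")).map (fun x => PySem.Str.strip x ++ ".")) := by
  induction raw with
  | nil =>
    intro acc pend
    cases pend <;> simp [pairUp]
  | cons x rest ih =>
    intro acc pend
    by_cases hx : PySem.Str.strip x = ""
    · rw [List.foldl_cons]
      have hstep : bStep (acc, pend) x = (acc, pend) := by simp [bStep, hx]
      rw [hstep, ih]
      simp [hx]
    · cases pend with
      | none =>
        rw [List.foldl_cons]
        have hstep : bStep (acc, none) x = (acc, some (PySem.Str.strip x ++ ".")) := by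
          simp [bStep, hx]
        rw [hstep, ih]
        simp [hx]
      | some p =>
        rw [List.foldl_cons]
        have hstep : bStep (acc, some p) x = (acc ++ [p ++ " " ++ (PySem.Str.strip x ++ ".")], none) := by
          simp [bStep, hx]
        rw [hstep, ih]
        simp [hx, pairUp]

-- ===== VERDICT (by name: the statement is the Claim_ definition above) =====
theorem split_text_two_spec : Claim_equal_split_text_two := by
  intro text _
  unfold Spec_split_text_two split_text_two split_text_two_alt
  have hA := loop_eq_pairUp
    ((((PySem.Str.split? text ".").getD []).filter
        (fun sentence => PySem.Str.strip sentence ≠ "")).map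
        (fun sentence => PySem.Str.strip sentence ++ "."))
    ((((PySem.Str.split? text ".").getD []).filter
        (fun sentence => PySem.Str.strip sentence ≠ "")).map
        (fun sentence => PySem.Str.strip sentence ++ ".")).length
    0 [] (by omega)
  have hB := bfold_eq_pairUp ((PySem.Str.split? text ".").getD []) [] none
  simp only [List.drop_zero, List.nil_append, Option.toList_none] at hA hB
  exact hA.trans hB.symm
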